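-- pv_equiv track=rewrite | github.com/AJ662/sketchtocad-workflow-orchestrator | app/service.py | _create_default_clusters
-- ===== SOURCE A (Python) =====
-- from typing import Dict, Any
--
-- def _create_default_clusters(bed_count: int) -> Dict[str, list]:
--     """Create default clusters for demonstration"""
--     # Simple clustering: every 3 beds in same cluster
--     clusters = {}
--     for i in range(bed_count):
--         cluster_id = str(i // 3)
--         if cluster_id not in clusters:
--             clusters[cluster_id] = []
--         clusters[cluster_id].append(i)
--     return clusters
-- ===== SOURCE B (Python) =====
-- def _create_default_clusters(bed_count: int):
--     n = -(-bed_count // 3)  # ceiling division: number of clusters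
--     return {str(c): list(range(3 * c, min(3 * c + 3, bed_count))) for c in range(n)}
-- ===== Notes on version B (the rewrite author's own statement) =====
-- stated objective: simpler
-- what changed: Iterates over the ceil(bed_count/3) clusters and builds each bed slice with range(), instead of iterating over every bed with a per-bed membership test and append.
import Mathlib
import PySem

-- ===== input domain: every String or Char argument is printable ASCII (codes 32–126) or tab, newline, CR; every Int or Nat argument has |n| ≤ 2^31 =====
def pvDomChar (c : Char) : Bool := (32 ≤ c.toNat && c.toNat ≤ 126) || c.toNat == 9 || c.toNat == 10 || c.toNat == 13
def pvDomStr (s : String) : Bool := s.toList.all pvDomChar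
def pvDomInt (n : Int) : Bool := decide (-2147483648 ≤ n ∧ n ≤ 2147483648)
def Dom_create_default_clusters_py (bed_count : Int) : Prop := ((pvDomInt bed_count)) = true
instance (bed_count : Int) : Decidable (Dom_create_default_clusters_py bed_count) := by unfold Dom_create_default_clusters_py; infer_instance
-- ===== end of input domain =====

-- B iterates over the clusters and builds each bed slice with range(); simpler decomposition, return value only.

-- ===== PORT A =====
def create_default_clusters_py (bed_count : Int) : List (String × List Int) :=
  ((PySem.List.pyRange 0 bed_count 1).foldl
    (fun clusters i =>
      let cluster_id := PySem.Int.toStr (PySem.Int.floordiv i 3)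
      let clusters := if clusters.contains cluster_id then clusters
                      else clusters.insert cluster_id ([] : List Int)
      clusters.modify cluster_id [] (fun l => l ++ [i]))
    PySem.Dict.empty).items

-- ===== PORT B =====
def create_default_clusters_py_alt (bed_count : Int) : List (String × List Int) :=
  let n := -(PySem.Int.floordiv (-bed_count) 3)
  (PySem.List.pyRange 0 n 1).map (fun c =>
    (PySem.Int.toStr c, PySem.List.pyRange (3 * c) (min (3 * c + 3) bed_count) 1))

-- ===== PRECONDITION & SPEC =====
def Spec_create_default_clusters_py (bed_count : Int) (out : List (String × List Int)) : Prop := out = create_default_clusters_py_alt bed_count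
instance (bed_count : Int) (out : List (String × List Int)) : Decidable (Spec_create_default_clusters_py bed_count out) := by unfold Spec_create_default_clusters_py; infer_instance

-- ===== CLAIM (what is proved, stated in full; the proofs are below) =====
def Claim_equal_create_default_clusters_py : Prop := ∀ (bed_count : Int), Dom_create_default_clusters_py bed_count → Spec_create_default_clusters_py bed_count (create_default_clusters_py bed_count)

-- ===== LEMMAS AND PROOFS =====

-- A's loop body, named for the proofs (definitionally the lambda in the port).
def pvStep (clusters : PySem.Dict String (List Int)) (i : Int) : PySem.Dict String (List Int) :=
  let cluster_id := PySem.Int.toStr (PySem.Int.floordiv i 3)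
  let clusters := if clusters.contains cluster_id then clusters
                  else clusters.insert cluster_id ([] : List Int)
  clusters.modify cluster_id [] (fun l => l ++ [i])

-- B's entry for cluster c with bed bound m.
def pvF (m : Int) (c : Nat) : String × List Int :=
  (PySem.Int.toStr (c : Int), PySem.List.pyRange (3 * (c : Int)) (min (3 * (c : Int) + 3) m) 1)

def pvL (N : Nat) : List (String × List Int) := (List.range ((N + 2) / 3)).map (pvF (N : Int))

lemma pvDigitChar_inj {a b : Nat} (ha : a < 10) (hb : b < 10)
    (h : Nat.digitChar a = Nat.digitChar b) : a = b := by
  interval_cases a <;> interval_cases b <;> revert h <;> decide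

lemma pvToDigits_ne_nil (n : Nat) : Nat.toDigits 10 n ≠ [] := by
  rw [Nat.toDigits_eq_if (by norm_num)]
  split <;> simp

lemma pvToDigits_inj : ∀ {a b : Nat}, Nat.toDigits 10 a = Nat.toDigits 10 b → a = b := by
  intro a
  induction a using Nat.strong_induction_on with
  | _ a ih =>
    intro b h
    rw [Nat.toDigits_eq_if (n := a) (by norm_num : (1:Nat) < 10),
        Nat.toDigits_eq_if (n := b) (by norm_num : (1:Nat) < 10)] at h
    by_cases ha : a < 10 <;> by_cases hb : b < 10
    · rw [if_pos ha, if_pos hb] at h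
      simp only [List.cons.injEq] at h
      exact pvDigitChar_inj ha hb h.1
    · rw [if_pos ha, if_neg hb] at h
      have hl := congrArg List.length h
      simp only [List.length_append, List.length_singleton] at hl
      have hne := pvToDigits_ne_nil (b / 10)
      have : (Nat.toDigits 10 (b / 10)).length ≠ 0 := by
        simpa [List.length_eq_zero_iff] using hne
      omega
    · rw [if_neg ha, if_pos hb] at h
      have hl := congrArg List.length h
      simp only [List.length_append, List.length_singleton] at hl
      have hne := pvToDigits_ne_nil (a / 10)
      have : (Nat.toDigits 10 (a / 10)).length ≠ 0 := by
        simpa [List.length_eq_zero_iff] using hne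
      omega
    · rw [if_neg ha, if_neg hb] at h
      obtain ⟨h2, h1⟩ := List.append_inj' h rfl
      simp only [List.cons.injEq] at h1
      have hd : a / 10 = b / 10 := ih (a / 10) (by omega) h2
      have hm : a % 10 = b % 10 :=
        pvDigitChar_inj (Nat.mod_lt _ (by norm_num)) (Nat.mod_lt _ (by norm_num)) h1.1
      omega

lemma pvToStr_nat_inj {a b : Nat} (h : PySem.Int.toStr (a : Int) = PySem.Int.toStr (b : Int)) : a = b := by
  have h' := congrArg String.toList h
  rw [PySem.Int.toList_toStr, PySem.Int.toList_toStr] at h'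
  unfold PySem.Int.toChars at h'
  simp at h'
  exact pvToDigits_inj h'

lemma pvKey_beq {c d : Nat} :
    (PySem.Int.toStr (c : Int) == PySem.Int.toStr (d : Int)) = decide (c = d) := by
  by_cases h : c = d
  · subst h; simp
  · simp [h]
    intro he
    exact h (pvToStr_nat_inj he)

lemma pvFd_natCast (N : Nat) : PySem.Int.floordiv (N : Int) 3 = ((N / 3 : Nat) : Int) := by
  unfold PySem.Int.floordiv
  rw [Int.fdiv_eq_ediv, if_pos (Or.inl (by norm_num))]
  omega

lemma pvNodupKeys (m : Int) (q : Nat) :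
    (((List.range q).map (pvF m)).map Prod.fst).Nodup := by
  rw [List.map_map]
  refine List.Nodup.map ?_ (List.nodup_range)
  intro a b h
  exact pvToStr_nat_inj h

lemma pvContains (m : Int) (q d : Nat) :
    (PySem.Dict.mk ((List.range q).map (pvF m))).contains (PySem.Int.toStr (d : Int))
      = decide (d < q) := by
  by_cases h : d < q
  · simp only [PySem.Dict.contains_mk, List.any_map, List.any_eq_true, h, decide_true]
    exact ⟨d, List.mem_range.mpr h, by simp [pvF]⟩
  · simp only [PySem.Dict.contains_mk, List.any_map, h, decide_false]
    rw [List.any_eq_false]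
    intro c hc
    simp only [Function.comp, pvF, pvKey_beq]
    simp only [List.mem_range] at hc
    simp
    omega

lemma pvGetD (m : Int) (q d : Nat) (hd : d < q) :
    (PySem.Dict.mk ((List.range q).map (pvF m))).getD (PySem.Int.toStr (d : Int)) []
      = (pvF m d).2 := by
  have hmem : (PySem.Int.toStr (d : Int), (pvF m d).2) ∈ (List.range q).map (pvF m) := by
    refine List.mem_map.mpr ⟨d, List.mem_range.mpr hd, ?_⟩
    simp [pvF]
  exact PySem.Dict.getD_of_mem_items _ hmem (pvNodupKeys m q) []

lemma pvStep_eq (N : Nat) :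
    pvStep (PySem.Dict.mk (pvL N)) (N : Int) = PySem.Dict.mk (pvL (N + 1)) := by
  have hfd : PySem.Int.floordiv ((N : Nat) : Int) 3 = ((N / 3 : Nat) : Int) := pvFd_natCast N
  by_cases h3 : N % 3 = 0
  · -- new cluster key
    have hq : (N + 2) / 3 = N / 3 := by omega
    have hq1 : (N + 1 + 2) / 3 = N / 3 + 1 := by omega
    have hcon : (PySem.Dict.mk (pvL N)).contains (PySem.Int.toStr ((N / 3 : Nat) : Int)) = false := by
      unfold pvL
      rw [hq, pvContains]
      simp
    unfold pvStep
    simp only [hfd, hcon, Bool.false_eq_true, if_false]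
    unfold PySem.Dict.modify
    rw [PySem.Dict.getD_insert_self, PySem.Dict.insert_insert_self]
    apply PySem.Dict.ext
    rw [PySem.Dict.items_insert_of_not_contains _ _ hcon]
    show pvL N ++ [(PySem.Int.toStr ((N / 3 : Nat) : Int), [] ++ [(N : Int)])] = pvL (N + 1)
    unfold pvL
    rw [hq, hq1, List.range_succ, List.map_append]
    congr 1
    · refine List.map_congr_left ?_
      intro c hc
      simp only [List.mem_range] at hc
      unfold pvF
      have h1 : min (3 * (c : Int) + 3) ((N : Nat) : Int) = 3 * (c : Int) + 3 :=
        min_eq_left (by omega)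
      have h2 : min (3 * (c : Int) + 3) (((N + 1 : Nat)) : Int) = 3 * (c : Int) + 3 :=
        min_eq_left (by omega)
      rw [h1, h2]
    · simp only [List.map_cons, List.map_nil]
      unfold pvF
      have h1 : (3 * ((N / 3 : Nat) : Int)) = ((N : Nat) : Int) := by omega
      have h2 : min (3 * ((N / 3 : Nat) : Int) + 3) (((N + 1 : Nat)) : Int) = ((N : Nat) : Int) + 1 :=
        min_eq_right (by omega)
      rw [h2, h1, PySem.List.pyRange_one_singleton]
      simp
  · -- bed joins the last, partial cluster
    have hq : (N + 2) / 3 = N / 3 + 1 := by omega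
    have hq1 : (N + 1 + 2) / 3 = N / 3 + 1 := by omega
    have hcon : (PySem.Dict.mk (pvL N)).contains (PySem.Int.toStr ((N / 3 : Nat) : Int)) = true := by
      unfold pvL
      rw [hq, pvContains]
      simp
    unfold pvStep
    simp only [hfd, hcon, if_true]
    unfold PySem.Dict.modify
    apply PySem.Dict.ext
    rw [PySem.Dict.items_insert_of_contains _ _ hcon]
    show (pvL N).map _ = pvL (N + 1)
    unfold pvL
    rw [hq, hq1, List.map_map]
    refine List.map_congr_left ?_
    intro c hc
    simp only [List.mem_range] at hc
    simp only [Function.comp]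
    by_cases hcd : c = N / 3
    · subst hcd
      have hbeq : ((pvF ((N : Nat) : Int) (N / 3)).1 == PySem.Int.toStr ((N / 3 : Nat) : Int)) = true := by
        show (PySem.Int.toStr ((N / 3 : Nat) : Int) == PySem.Int.toStr ((N / 3 : Nat) : Int)) = true
        rw [pvKey_beq]; exact decide_eq_true rfl
      rw [if_pos hbeq]
      have hget : (PySem.Dict.mk ((List.range (N / 3 + 1)).map (pvF ((N : Nat) : Int)))).getD
            (PySem.Int.toStr ((N / 3 : Nat) : Int)) []
          = (pvF ((N : Nat) : Int) (N / 3)).2 :=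
        pvGetD _ _ _ (by omega)
      rw [hget]
      unfold pvF
      have h1 : min (3 * ((N / 3 : Nat) : Int) + 3) ((N : Nat) : Int) = ((N : Nat) : Int) :=
        min_eq_right (by omega)
      have h2 : min (3 * ((N / 3 : Nat) : Int) + 3) (((N + 1 : Nat)) : Int) = ((N : Nat) : Int) + 1 :=
        min_eq_right (by omega)
      rw [h1, h2]
      simp only
      rw [← PySem.List.pyRange_one_succ_right (by omega)]
    · have hbeq : ((pvF ((N : Nat) : Int) c).1 == PySem.Int.toStr ((N / 3 : Nat) : Int)) = false := by
        show (PySem.Int.toStr ((c : Nat) : Int) == PySem.Int.toStr ((N / 3 : Nat) : Int)) = false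
        rw [pvKey_beq]; exact decide_eq_false hcd
      simp only [hbeq, Bool.false_eq_true, if_false]
      unfold pvF
      have h1 : min (3 * (c : Int) + 3) ((N : Nat) : Int) = 3 * (c : Int) + 3 :=
        min_eq_left (by omega)
      have h2 : min (3 * (c : Int) + 3) (((N + 1 : Nat)) : Int) = 3 * (c : Int) + 3 :=
        min_eq_left (by omega)
      rw [h1, h2]

lemma pvMain (N : Nat) :
    (PySem.List.pyRange 0 (N : Int) 1).foldl pvStep PySem.Dict.empty
      = PySem.Dict.mk (pvL N) := by
  induction N with
  | zero => rfl
  | succ N ih =>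
    have hc : ((N + 1 : Nat) : Int) = (N : Int) + 1 := by push_cast; ring
    rw [hc, PySem.List.pyRange_one_succ_right (by positivity), List.foldl_append, ih]
    simp only [List.foldl_cons, List.foldl_nil]
    exact pvStep_eq N

lemma pvNcast (N : Nat) :
    -(PySem.Int.floordiv (-((N : Nat) : Int)) 3) = (((N + 2) / 3 : Nat) : Int) := by
  unfold PySem.Int.floordiv
  rw [Int.fdiv_eq_ediv, if_pos (Or.inl (by norm_num))]
  omega

-- ===== VERDICT (by name: the statement is the Claim_ definition above) =====
theorem create_default_clusters_py_spec : Claim_equal_create_default_clusters_py := by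
  intro bc _
  unfold Spec_create_default_clusters_py create_default_clusters_py create_default_clusters_py_alt
  rcases Int.lt_or_le bc 0 with hb | hb
  · have hn : -(PySem.Int.floordiv (-bc) 3) ≤ 0 := by
      have : (0 : Int) ≤ (-bc).fdiv 3 := Int.fdiv_nonneg (by omega) (by norm_num)
      unfold PySem.Int.floordiv
      omega
    show ((PySem.List.pyRange 0 bc 1).foldl pvStep PySem.Dict.empty).items
        = (PySem.List.pyRange 0 (-(PySem.Int.floordiv (-bc) 3)) 1).map
            (fun c => (PySem.Int.toStr c, PySem.List.pyRange (3 * c) (min (3 * c + 3) bc) 1))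
    rw [PySem.List.pyRange_one_eq_nil (by omega), PySem.List.pyRange_one_eq_nil hn]
    rfl
  · obtain ⟨N, rfl⟩ : ∃ N : Nat, bc = (N : Int) := ⟨bc.toNat, (Int.toNat_of_nonneg hb).symm⟩
    show ((PySem.List.pyRange 0 ((N : Nat) : Int) 1).foldl pvStep PySem.Dict.empty).items
        = (PySem.List.pyRange 0 (-(PySem.Int.floordiv (-((N : Nat) : Int)) 3)) 1).map
            (fun c => (PySem.Int.toStr c, PySem.List.pyRange (3 * c) (min (3 * c + 3) ((N : Nat) : Int)) 1))
    rw [pvMain, pvNcast, PySem.List.pyRange_zero_natCast, List.map_map]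
    rfl
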